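-- pv_equiv track=rewrite | github.com/yamilajoyshih/unruly | tp1/unruly.py | es_valida
-- ===== SOURCE A (Python) =====
-- UNO= "1"
--
-- CERO= "0"
--
-- VACIO= " "
--
-- def es_valida(valor_de_la_celda) -> bool:
--     """Devuelve un booleano indicando si la lista de valores cumple las tres condiciones para ser considerada valida """
--     if VACIO in valor_de_la_celda:
--         return False
--     suma_de_unos = sum(1 for valor in valor_de_la_celda if valor == UNO )
--     suma_de_ceros = sum (1 for valor in valor_de_la_celda if valor == CERO)
--     if suma_de_unos != suma_de_ceros:
--         return False
--     for i in range (len(valor_de_la_celda)-2):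
--         if valor_de_la_celda[i] == valor_de_la_celda[i+1] == valor_de_la_celda [i+2]:
--             return False
--     return True
-- ===== SOURCE B (Python) =====
-- UNO = "1"
--
-- CERO = "0"
--
-- VACIO = " "
--
-- def es_valida(valor_de_la_celda) -> bool:
--     """Single pass: counts, previous-two window and blank flag maintained together."""
--     ones = 0
--     zeros = 0
--     blank = False
--     triple = False
--     p2 = None
--     p1 = None
--     for v in valor_de_la_celda:
--         if v == UNO:
--             ones += 1
--         if v == CERO:
--             zeros += 1
--         if v == VACIO:
--             blank = True
--         if v == p1 and p1 == p2:
--             triple = True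
--         p2, p1 = p1, v
--     return (not blank) and ones == zeros and (not triple)
-- ===== Notes on version B (the rewrite author's own statement) =====
-- stated objective: alternative
-- what changed: Replaced A's three separate scans (membership test, two generator sums, an index-window loop) by one structural pass that maintains ones/zeros counters, a blank flag and the previous two elements to detect a run of three.
import Mathlib
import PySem

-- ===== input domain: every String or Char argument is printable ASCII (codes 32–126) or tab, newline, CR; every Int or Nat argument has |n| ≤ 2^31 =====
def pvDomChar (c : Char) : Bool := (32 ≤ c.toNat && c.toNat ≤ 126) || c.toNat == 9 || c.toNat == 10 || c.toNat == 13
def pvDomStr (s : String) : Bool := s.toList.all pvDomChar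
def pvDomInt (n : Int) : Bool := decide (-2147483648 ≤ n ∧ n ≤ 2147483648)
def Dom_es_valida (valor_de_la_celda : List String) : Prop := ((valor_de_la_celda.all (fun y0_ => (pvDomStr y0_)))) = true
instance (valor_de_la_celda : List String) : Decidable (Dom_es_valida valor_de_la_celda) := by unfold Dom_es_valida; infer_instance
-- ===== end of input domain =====

-- B replaces A's three separate scans by one pass keeping counters, a blank flag and the last two elements (objective: alternative decomposition).

-- ===== PORT A =====
def es_valida (valor_de_la_celda : List String) : Bool :=
  if " " ∈ valor_de_la_celda then false
  else
    let suma_de_unos : Int :=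
      valor_de_la_celda.foldl (fun acc valor => if valor = "1" then acc + 1 else acc) 0
    let suma_de_ceros : Int :=
      valor_de_la_celda.foldl (fun acc valor => if valor = "0" then acc + 1 else acc) 0
    if suma_de_unos ≠ suma_de_ceros then false
    else if (PySem.List.pyRange 0 ((valor_de_la_celda.length : Int) - 2) 1).any (fun i =>
        (PySem.List.pyGet? valor_de_la_celda i == PySem.List.pyGet? valor_de_la_celda (i + 1)) &&
        (PySem.List.pyGet? valor_de_la_celda (i + 1) == PySem.List.pyGet? valor_de_la_celda (i + 2)))
    then false
    else true

-- ===== PORT B =====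
def esValidaStep (st : Int × Int × Bool × Bool × Option String × Option String) (v : String) :
    Int × Int × Bool × Bool × Option String × Option String :=
  let (ones, zeros, blank, triple, p2, p1) := st
  ((if v = "1" then ones + 1 else ones),
   (if v = "0" then zeros + 1 else zeros),
   (blank || (v == " ")),
   (triple || ((some v == p1) && (p1 == p2))),
   p1, some v)

def es_valida_alt (valor_de_la_celda : List String) : Bool :=
  let st := valor_de_la_celda.foldl esValidaStep (0, 0, false, false, none, none)
  (!st.2.2.1) && (st.1 == st.2.1) && (!st.2.2.2.1)

-- ===== PRECONDITION & SPEC =====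
def Spec_es_valida (valor_de_la_celda : List String) (out : Bool) : Prop := out = es_valida_alt valor_de_la_celda
instance (valor_de_la_celda : List String) (out : Bool) : Decidable (Spec_es_valida valor_de_la_celda out) := by unfold Spec_es_valida; infer_instance

-- ===== CLAIM (what is proved, stated in full; the proofs are below) =====
def Claim_equal_es_valida : Prop := ∀ (valor_de_la_celda : List String), Dom_es_valida valor_de_la_celda → Spec_es_valida valor_de_la_celda (es_valida valor_de_la_celda)

-- ===== LEMMAS AND PROOFS =====

-- structural "three equal in a row" predicate, common reference point of both proofs
def hasT : List String → Bool
  | a :: b :: c :: r => ((a == b) && (b == c)) || hasT (b :: c :: r)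
  | _ => false

-- B's triple flag as a standalone recursion over the list
def trip : Option String → Option String → List String → Bool
  | _, _, [] => false
  | p2, p1, v :: r => ((some v == p1) && (p1 == p2)) || trip p1 (some v) r

-- projections of B's fold
theorem fold_ones (l : List String) :
    ∀ (o z : Int) (bl tr : Bool) (p2 p1 : Option String),
    (l.foldl esValidaStep (o, z, bl, tr, p2, p1)).1 =
      l.foldl (fun acc v => if v = "1" then acc + 1 else acc) o := by
  induction l with
  | nil => intro o z bl tr p2 p1; rfl
  | cons v r ih => intro o z bl tr p2 p1; simp [List.foldl, esValidaStep, ih]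

theorem fold_zeros (l : List String) :
    ∀ (o z : Int) (bl tr : Bool) (p2 p1 : Option String),
    (l.foldl esValidaStep (o, z, bl, tr, p2, p1)).2.1 =
      l.foldl (fun acc v => if v = "0" then acc + 1 else acc) z := by
  induction l with
  | nil => intro o z bl tr p2 p1; rfl
  | cons v r ih => intro o z bl tr p2 p1; simp [List.foldl, esValidaStep, ih]

theorem fold_blank (l : List String) :
    ∀ (o z : Int) (bl tr : Bool) (p2 p1 : Option String),
    (l.foldl esValidaStep (o, z, bl, tr, p2, p1)).2.2.1 =
      (bl || l.any (fun v => v == " ")) := by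
  induction l with
  | nil => intro o z bl tr p2 p1; simp [List.foldl]
  | cons v r ih =>
    intro o z bl tr p2 p1
    simp [List.foldl, esValidaStep, ih, Bool.or_assoc]

theorem fold_triple (l : List String) :
    ∀ (o z : Int) (bl tr : Bool) (p2 p1 : Option String),
    (l.foldl esValidaStep (o, z, bl, tr, p2, p1)).2.2.2.1 = (tr || trip p2 p1 l) := by
  induction l with
  | nil => intro o z bl tr p2 p1; simp [List.foldl, trip]
  | cons v r ih =>
    intro o z bl tr p2 p1
    simp [List.foldl, esValidaStep, ih, trip, Bool.or_assoc]

theorem trip_some (r : List String) :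
    ∀ (a b : String), trip (some a) (some b) r = hasT (a :: b :: r) := by
  induction r with
  | nil => intro a b; rfl
  | cons v r' ih =>
    intro a b
    simp only [trip, hasT, ih]
    have h : ((some v == some b) && ((some b : Option String) == some a)) = ((a == b) && (b == v)) := by
      rw [Bool.eq_iff_iff]
      simp only [Bool.and_eq_true, beq_iff_eq, Option.some.injEq]
      constructor
      · rintro ⟨h1, h2⟩; exact ⟨h2.symm, h1.symm⟩
      · rintro ⟨h1, h2⟩; exact ⟨h2.symm, h1.symm⟩
    rw [h]

theorem trip_none (l : List String) : trip none none l = hasT l := by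
  match l with
  | [] => rfl
  | [v] => simp [trip, hasT]
  | v :: w :: r => simp [trip, trip_some]

-- the Nat-indexed window test, abbreviation for A's index check
def Qwin (l : List String) (k : Nat) : Bool :=
  (l[k]? == l[k + 1]?) && (l[k + 1]? == l[k + 2]?)

theorem range_any_hasT (l : List String) :
    (List.range (l.length - 2)).any (Qwin l) = hasT l := by
  match l with
  | [] => rfl
  | [a] => rfl
  | [a, b] => rfl
  | a :: b :: c :: r =>
    have hlen : (a :: b :: c :: r).length - 2 = r.length + 1 := by simp
    rw [hlen, List.range_succ_eq_map, List.any_cons, List.any_map]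
    have htail : (Qwin (a :: b :: c :: r) ∘ Nat.succ) = Qwin (b :: c :: r) := by
      funext k; simp [Qwin]
    have hrec := range_any_hasT (b :: c :: r)
    have hr : (b :: c :: r).length - 2 = r.length := by simp
    rw [hr] at hrec
    rw [htail, hrec]
    simp [hasT, Qwin]
termination_by l.length

-- A's pyRange/pyGet? check equals the Nat-indexed window test
theorem pyrange_any_eq (l : List String) :
    ((PySem.List.pyRange 0 ((l.length : Int) - 2) 1).any (fun i =>
        (PySem.List.pyGet? l i == PySem.List.pyGet? l (i + 1)) &&
        (PySem.List.pyGet? l (i + 1) == PySem.List.pyGet? l (i + 2))))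
      = (List.range (l.length - 2)).any (Qwin l) := by
  rw [PySem.List.pyRange_one]
  have hnt : (((l.length : Int) - 2) - 0).toNat = l.length - 2 := by omega
  rw [hnt, List.any_map]
  congr 1
  funext k
  have e0 : ((0 : Int) + (k : Nat)) = ((k : Nat) : Int) := by ring
  have e1 : ((k : Nat) : Int) + 1 = (((k + 1 : Nat)) : Int) := by push_cast; ring
  have e2 : ((k : Nat) : Int) + 2 = (((k + 2 : Nat)) : Int) := by push_cast; ring
  simp only [Function.comp_apply, e0, e1, e2, PySem.List.pyGet?_natCast]
  rfl

theorem any_blank (l : List String) :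
    (l.any (fun v => v == " ")) = decide (" " ∈ l) := by
  induction l with
  | nil => simp
  | cons v r ih =>
    by_cases h : v = " "
    · subst h; simp
    · simp [List.any_cons, ih, h, Ne.symm h]

-- ===== VERDICT (by name: the statement is the Claim_ definition above) =====
theorem es_valida_spec : Claim_equal_es_valida := by
  intro l _
  unfold Spec_es_valida
  simp only [es_valida, es_valida_alt, fold_ones, fold_zeros, fold_blank, fold_triple,
    trip_none, any_blank, pyrange_any_eq, range_any_hasT]
  by_cases hm : " " ∈ l
  · simp [hm]
  · simp only [hm, decide_false, if_false, Bool.false_or, Bool.not_false, Bool.true_and]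
    by_cases hs : l.foldl (fun acc v => if v = "1" then acc + 1 else acc) (0 : Int) =
        l.foldl (fun acc v => if v = "0" then acc + 1 else acc) (0 : Int)
    · simp only [hs, ne_eq, not_true_eq_false, if_false, beq_self_eq_true, Bool.true_and]
      cases hasT l <;> simp
    · simp [hs]
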